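-- pv_equiv track=rewrite | github.com/NECC/Material-Do-Curso | 2º ano/Laboratório de Algoritmia II/Treinos/Treino 1/repete.py | repete
-- ===== SOURCE A (Python) =====
-- def repete(palavra,n):
--     subStrings = []
--     for i in range(1,len(palavra)):
--         subStrings.append(palavra[i:])
--
--     repeated=""
--     for el in subStrings:
--         if palavra[:len(el)] == el:
--             repeated = el
--             palavra = palavra[:-len(el)]
--             break
--
--     palavra = palavra*n + repeated*(n > 0)
--     return palavra
-- ===== SOURCE B (Python) =====
-- def repete(palavra, n):
--     if n <= 0:
--         return ""
--     L = len(palavra)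
--     # KMP failure function: fail[i] = length of the longest proper border of palavra[:i+1]
--     fail = [0]
--     for i in range(1, L):
--         k = fail[i - 1]
--         while k and palavra[i] != palavra[k]:
--             k = fail[k - 1]
--         if palavra[i] == palavra[k]:
--             k += 1
--         fail.append(k)
--     b = fail[-1]
--     return palavra[:L - b] * n + palavra[:b]
-- ===== Notes on version B (the rewrite author's own statement) =====
-- stated objective: alternative
-- what changed: B computes the longest proper border with the KMP failure-function (prefix-function) recurrence in one linear pass instead of A's building every proper suffix and comparing each whole suffix slice against the prefix; the O(n*L) output build is unchanged and dominates on large inputs.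
import Mathlib
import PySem

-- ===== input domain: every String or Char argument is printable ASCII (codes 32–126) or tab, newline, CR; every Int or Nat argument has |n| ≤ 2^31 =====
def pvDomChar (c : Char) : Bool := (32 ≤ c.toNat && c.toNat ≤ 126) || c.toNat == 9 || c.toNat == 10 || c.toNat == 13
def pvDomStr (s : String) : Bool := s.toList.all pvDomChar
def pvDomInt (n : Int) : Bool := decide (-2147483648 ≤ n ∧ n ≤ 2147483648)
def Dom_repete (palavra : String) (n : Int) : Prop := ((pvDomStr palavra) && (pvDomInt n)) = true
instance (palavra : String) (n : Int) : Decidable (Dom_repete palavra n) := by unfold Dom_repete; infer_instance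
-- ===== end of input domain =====

-- B finds the longest proper border by the KMP failure-function (prefix-function) recurrence
-- instead of A's building every proper suffix and comparing each slice; objective: alternative.

-- ===== PORT A =====
-- the 'for el in subStrings: … break' loop: returns (palavra after the break, repeated)
def repeteLoopA : List (List Char) → List Char → (List Char × List Char)
  | [], p => (p, [])
  | el :: rest, p =>
    if PySem.List.slice p none (some (el.length : Int)) = el then
      (PySem.List.slice p none (some (-(el.length : Int))), el)
    else repeteLoopA rest p

-- subStrings = [palavra[1:], palavra[2:], …]
def repeteSub (l : List Char) : List (List Char) :=
  (PySem.List.pyRange 1 (l.length : Int) 1).foldl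
    (fun acc i => acc ++ [PySem.List.slice l (some i) none]) []

def repete (palavra : String) (n : Int) : String :=
  String.ofList
    (PySem.List.pyRepeat (repeteLoopA (repeteSub palavra.toList) palavra.toList).1 n
     ++ PySem.List.pyRepeat (repeteLoopA (repeteSub palavra.toList) palavra.toList).2
          (if n > 0 then 1 else 0))

-- ===== PORT B =====
-- 'while k and palavra[i] != palavra[k]: k = fail[k-1]'. fuel = initial k: the loop strictly
-- decreases k (fail[j] ≤ j, proved below), so fuel k suffices — the guard only ensures totality.
-- palavra[i]/palavra[k] are ported as getD: the indices are in range on every reachable call.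
def kmpWhile (pal : List Char) (fl : List Nat) (ci : Char) : Nat → Nat → Nat
  | 0, k => k
  | fuel + 1, k =>
    if k ≠ 0 ∧ ci ≠ pal.getD k ' ' then kmpWhile pal fl ci fuel (fl.getD (k - 1) 0) else k

-- the 'for i in range(1, L)' loop building fail (list append = Python's fail.append)
def kmpFold (pal : List Char) : List Nat :=
  (PySem.List.pyRange 1 (pal.length : Int) 1).foldl
    (fun fl i =>
      let ci := pal.getD i.toNat ' '        -- palavra[i], 1 ≤ i < L so exact
      let k0 := fl.getD (i.toNat - 1) 0     -- fail[i-1], exact: fl has i entries here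
      let k1 := kmpWhile pal fl ci k0 k0
      let k2 := if ci = pal.getD k1 ' ' then k1 + 1 else k1
      fl ++ [k2]) [0]

def repete_alt (palavra : String) (n : Int) : String :=
  if n ≤ 0 then "" else
    let l := palavra.toList
    let b := (kmpFold l).getLastD 0        -- fail[-1]; fail is never empty
    -- palavra[:L-b] and palavra[:b] with 0 ≤ b ≤ L: exactly List.take
    String.ofList (PySem.List.pyRepeat (l.take (l.length - b)) n ++ l.take b)

-- ===== PRECONDITION & SPEC =====
def Spec_repete (palavra : String) (n : Int) (out : String) : Prop := out = repete_alt palavra n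
instance (palavra : String) (n : Int) (out : String) : Decidable (Spec_repete palavra n out) := by unfold Spec_repete; infer_instance

-- ===== CLAIM (what is proved, stated in full; the proofs are below) =====
def Claim_equal_repete : Prop := ∀ (palavra : String) (n : Int), Dom_repete palavra n → Spec_repete palavra n (repete palavra n)

-- ===== LEMMAS AND PROOFS =====

-- the border predicate: prefix of length k equals suffix of length k
abbrev pvBorder (l : List Char) (k : Nat) : Prop := l.take k = l.drop (l.length - k)

-- longest proper border length
def pvMB (l : List Char) : Nat := Nat.findGreatest (pvBorder l) (l.length - 1)

lemma pv_border_zero (l : List Char) : pvBorder l 0 := by simp [pvBorder]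

lemma pv_mb_border (l : List Char) : pvBorder l (pvMB l) := by
  unfold pvMB
  rcases Nat.eq_zero_or_pos (Nat.findGreatest (pvBorder l) (l.length - 1)) with h0 | hpos
  · rw [h0]; exact pv_border_zero l
  · obtain ⟨k, hk0, hkm, hk⟩ := Nat.findGreatest_pos.mp hpos
    exact Nat.findGreatest_spec hkm hk

lemma pv_mb_le (l : List Char) : pvMB l ≤ l.length - 1 := Nat.findGreatest_le _

-- borders of a border are borders: for k ≤ m with m a border of t, borders of t.take m ↔ borders of t
lemma pv_border_take_iff (t : List Char) (m k : Nat) (hm : pvBorder t m) (hmt : m ≤ t.length)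
    (hk : k ≤ m) : pvBorder (t.take m) k ↔ pvBorder t k := by
  unfold pvBorder
  have hlen : (t.take m).length = m := by simp [hmt]
  rw [hlen, List.take_take, Nat.min_eq_left hk, hm, List.drop_drop]
  have : t.length - m + (m - k) = t.length - k := by omega
  rw [this]

-- extension: j+1 is a border of t ++ [c] iff j is a border of t and t[j] = c
lemma pv_border_snoc (t : List Char) (c : Char) (j : Nat) (hj : j < t.length) :
    pvBorder (t ++ [c]) (j + 1) ↔ (pvBorder t j ∧ t.getD j ' ' = c) := by
  unfold pvBorder
  have h1 : (t ++ [c]).take (j + 1) = t.take j ++ [t.getD j ' '] := by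
    rw [List.take_append_of_le_length (by omega), List.take_add_one]
    simp [List.getD, List.getElem?_eq_getElem hj]
  have h2 : (t ++ [c]).length - (j + 1) = t.length - j := by simp
  have h3 : (t ++ [c]).drop (t.length - j) = t.drop (t.length - j) ++ [c] := by
    rw [List.drop_append_of_le_length (by omega)]
  rw [h1, h2, h3]
  constructor
  · intro h
    have hlt : (t.take j).length = (t.drop (t.length - j)).length := by simp; omega
    obtain ⟨h4, h5⟩ := List.append_inj h (by simpa using hlt)
    exact ⟨h4, by simpa using h5⟩
  · rintro ⟨h4, h5⟩; rw [h4, h5]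

lemma pv_getD_take (l : List Char) (i j : Nat) (h : j < i) :
    (l.take i).getD j ' ' = l.getD j ' ' := by
  simp [List.getD, h]

-- the while loop: starting at a border k of t = pal.take i it returns a border r ≤ k that either
-- matches c or is 0, and no j ∈ (r, k] is a matching border
lemma pv_kmpWhile_spec (pal : List Char) (i : Nat) (hi : i < pal.length) (fl : List Nat)
    (hfl : ∀ j, j < i → fl.getD j 0 = pvMB (pal.take (j + 1))) (c : Char) :
    ∀ fuel k, k ≤ fuel → k < i → pvBorder (pal.take i) k →
      ∃ r, kmpWhile pal fl c fuel k = r ∧ r ≤ k ∧ pvBorder (pal.take i) r ∧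
        (pal.getD r ' ' = c ∨ r = 0) ∧
        ∀ j, r < j → j ≤ k → ¬(pvBorder (pal.take i) j ∧ pal.getD j ' ' = c) := by
  have hti : (pal.take i).length = i := by simp; omega
  intro fuel
  induction fuel with
  | zero =>
    intro k hk _ hb
    interval_cases k
    exact ⟨0, rfl, le_refl 0, hb, Or.inr rfl, by omega⟩
  | succ fuel ih =>
    intro k hk hki hb
    by_cases hk0 : k = 0
    · subst hk0
      refine ⟨0, ?_, le_refl 0, hb, Or.inr rfl, by omega⟩
      simp [kmpWhile]
    by_cases hc : c = pal.getD k ' '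
    · refine ⟨k, ?_, le_refl k, hb, Or.inl hc.symm, by omega⟩
      rw [kmpWhile, if_neg (fun h => h.2 hc)]
    · -- recurse with k' = fail[k-1] = pvMB (pal.take k)
      have hstep : kmpWhile pal fl c (fuel + 1) k = kmpWhile pal fl c fuel (fl.getD (k - 1) 0) := by
        rw [kmpWhile, if_pos ⟨hk0, hc⟩]
      have hflk : fl.getD (k - 1) 0 = pvMB (pal.take k) := by
        have := hfl (k - 1) (by omega)
        rwa [Nat.sub_add_cancel (by omega)] at this
      set k' := fl.getD (k - 1) 0 with hk'
      have hlenk : (pal.take k).length = k := by simp; omega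
      have hk'lt : k' < k := by
        have := pv_mb_le (pal.take k)
        rw [hflk]; omega
      have hbk' : pvBorder (pal.take i) k' := by
        have h1 : pvBorder (pal.take k) k' := by rw [hflk]; exact pv_mb_border _
        have h2 : (pal.take i).take k = pal.take k := by
          rw [List.take_take, Nat.min_eq_left (by omega)]
        rw [← h2] at h1
        exact (pv_border_take_iff (pal.take i) k k' hb (by omega) (by omega)).mp h1
      obtain ⟨r, hr, hrle, hrb, hrm, hrmax⟩ :=
        ih k' (by omega) (by omega) hbk'
      refine ⟨r, by rw [hstep, hr], by omega, hrb, hrm, ?_⟩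
      intro j hrj hjk ⟨hjb, hjc⟩
      by_cases hjk' : j ≤ k'
      · exact hrmax j hrj hjk' ⟨hjb, hjc⟩
      · by_cases hjkk : j = k
        · exact hc (hjkk ▸ hjc).symm
        · -- k' < j < k: j would be a border of pal.take k larger than its pvMB
          have hjb' : pvBorder (pal.take k) j := by
            have h2 : (pal.take i).take k = pal.take k := by
              rw [List.take_take, Nat.min_eq_left (by omega)]
            rw [← h2]
            exact (pv_border_take_iff (pal.take i) k j hb (by omega) (by omega)).mpr hjb
          have := Nat.findGreatest_is_greatest
            (show pvMB (pal.take k) < j by rw [← hflk]; omega)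
            (show j ≤ (pal.take k).length - 1 by omega)
          exact this hjb'

-- one step of the fold computes pvMB of the next prefix
lemma pv_kmpStep (pal : List Char) (i : Nat) (h1 : 1 ≤ i) (hi : i < pal.length) (fl : List Nat)
    (hfl : ∀ j, j < i → fl.getD j 0 = pvMB (pal.take (j + 1))) :
    (let ci := pal.getD i ' '
     let k0 := fl.getD (i - 1) 0
     let k1 := kmpWhile pal fl ci k0 k0
     if ci = pal.getD k1 ' ' then k1 + 1 else k1) = pvMB (pal.take (i + 1)) := by
  have hti : (pal.take i).length = i := by simp; omega
  have hsucc : pal.take (i + 1) = pal.take i ++ [pal.getD i ' '] := by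
    rw [List.take_add_one]
    simp [List.getD, List.getElem?_eq_getElem hi]
  have hk0 : fl.getD (i - 1) 0 = pvMB (pal.take i) := by
    have := hfl (i - 1) (by omega)
    rwa [Nat.sub_add_cancel h1] at this
  set c := pal.getD i ' ' with hc
  set k0 := fl.getD (i - 1) 0 with hk0d
  have hk0lt : k0 < i := by have := pv_mb_le (pal.take i); rw [hk0]; omega
  have hk0b : pvBorder (pal.take i) k0 := by rw [hk0]; exact pv_mb_border _
  obtain ⟨r, hr, hrle, hrb, hrm, hrmax⟩ :=
    pv_kmpWhile_spec pal i hi fl hfl c k0 k0 (le_refl _) hk0lt hk0b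
  -- any matching border j of pal.take i with j < i lies in (r, k0] only if excluded; j > k0 impossible
  have hnomatch : ∀ j, r < j → j < i → ¬(pvBorder (pal.take i) j ∧ pal.getD j ' ' = c) := by
    intro j hrj hji hj
    by_cases hjk0 : j ≤ k0
    · exact hrmax j hrj hjk0 hj
    · have := Nat.findGreatest_is_greatest
        (show pvMB (pal.take i) < j by rw [← hk0]; omega)
        (show j ≤ (pal.take i).length - 1 by omega)
      exact this hj.1
  have hlen1 : (pal.take (i + 1)).length = i + 1 := by simp; omega
  simp only [hr]
  by_cases hcm : c = pal.getD r ' '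
  · rw [if_pos hcm]
    unfold pvMB
    rw [show (pal.take (i + 1)).length - 1 = i by omega]
    symm
    apply Nat.findGreatest_eq_iff.mpr
    refine ⟨by omega, fun _ => ?_, ?_⟩
    · rw [hsucc]
      refine (pv_border_snoc (pal.take i) c r (by omega)).mpr ⟨hrb, ?_⟩
      rw [pv_getD_take pal i r (by omega)]
      exact hcm.symm
    · intro m hm hmle hmb
      obtain ⟨j, rfl⟩ : ∃ j, m = j + 1 := ⟨m - 1, by omega⟩
      rw [hsucc] at hmb
      have := (pv_border_snoc (pal.take i) c j (by omega)).mp hmb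
      rw [pv_getD_take pal i j (by omega)] at this
      exact hnomatch j (by omega) (by omega) this
  · rw [if_neg hcm]
    have hr0 : r = 0 := by
      rcases hrm with h | h
      · exact absurd h.symm hcm
      · exact h
    subst hr0
    unfold pvMB
    rw [show (pal.take (i + 1)).length - 1 = i by omega]
    symm
    apply Nat.findGreatest_eq_iff.mpr
    refine ⟨by omega, fun h => absurd rfl h, ?_⟩
    intro m hm hmle hmb
    obtain ⟨j, rfl⟩ : ∃ j, m = j + 1 := ⟨m - 1, by omega⟩
    rw [hsucc] at hmb
    have hj := (pv_border_snoc (pal.take i) c j (by omega)).mp hmb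
    rw [pv_getD_take pal i j (by omega)] at hj
    by_cases hj0 : j = 0
    · subst hj0; exact hcm hj.2.symm
    · exact hnomatch j (by omega) (by omega) hj

lemma pv_getD_map_range {f : Nat → Nat} (n j : Nat) (h : j < n) :
    ((List.range n).map f).getD j 0 = f j := by
  simp [List.getD, h]

-- the fold invariant: fail = [pvMB (take 1), …, pvMB (take (m+1))]
lemma pv_kmpFold_inv (pal : List Char) (m : Nat) (hm : m + 1 ≤ pal.length) :
    (PySem.List.pyRange 1 ((m + 1 : Nat) : Int) 1).foldl
      (fun fl i =>
        let ci := pal.getD i.toNat ' '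
        let k0 := fl.getD (i.toNat - 1) 0
        let k1 := kmpWhile pal fl ci k0 k0
        let k2 := if ci = pal.getD k1 ' ' then k1 + 1 else k1
        fl ++ [k2]) [0]
    = (List.range (m + 1)).map (fun j => pvMB (pal.take (j + 1))) := by
  induction m with
  | zero =>
    rw [PySem.List.pyRange_one_eq_nil (by norm_num)]
    simp [pvMB, List.range_succ]
  | succ m ih =>
    have hsplit : PySem.List.pyRange 1 ((m + 2 : Nat) : Int) 1
        = PySem.List.pyRange 1 ((m + 1 : Nat) : Int) 1 ++ [((m + 1 : Nat) : Int)] := by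
      have : ((m + 2 : Nat) : Int) = ((m + 1 : Nat) : Int) + 1 := by push_cast; ring
      rw [this]
      exact PySem.List.pyRange_one_succ_right (by omega)
    rw [show ((m + 1) + 1) = m + 2 from rfl] at *
    rw [hsplit, List.foldl_append, ih (by omega)]
    simp only [List.foldl_cons, List.foldl_nil]
    have htn : ((m + 1 : Nat) : Int).toNat = m + 1 := by omega
    set fl := (List.range (m + 1)).map (fun j => pvMB (pal.take (j + 1))) with hfl
    have hflp : ∀ j, j < m + 1 → fl.getD j 0 = pvMB (pal.take (j + 1)) := by
      intro j hj; exact pv_getD_map_range (m + 1) j hj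
    have hstep := pv_kmpStep pal (m + 1) (by omega) (by omega) fl hflp
    simp only [Nat.add_sub_cancel] at hstep
    rw [htn]
    simp only [Nat.add_sub_cancel]
    rw [hstep, List.range_succ]
    simp
    exact hfl

-- B's border value is pvMB of the whole word
lemma pv_kmpFold_last (l : List Char) : (kmpFold l).getLastD 0 = pvMB l := by
  unfold kmpFold
  rcases Nat.eq_zero_or_pos l.length with h0 | hpos
  · rw [PySem.List.pyRange_one_eq_nil (by omega)]
    have : l = [] := List.length_eq_zero_iff.mp h0
    subst this
    simp [pvMB]
  · obtain ⟨m, hm⟩ : ∃ m, l.length = m + 1 := ⟨l.length - 1, by omega⟩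
    rw [show (l.length : Int) = ((m + 1 : Nat) : Int) by rw [hm]]
    rw [pv_kmpFold_inv l m (by omega)]
    rw [List.range_succ]
    simp only [List.map_append, List.map_cons, List.map_nil, List.getLastD_concat]
    rw [show m + 1 = l.length from hm.symm, List.take_length]

-- ===== A-side lemmas (border search by suffix slices) =====

lemma pv_foldl_append_singleton {α β : Type} (f : α → β) (xs : List α) (acc : List β) :
    xs.foldl (fun a x => a ++ [f x]) acc = acc ++ xs.map f := by
  induction xs generalizing acc with
  | nil => simp
  | cons x t ih => simp [List.foldl_cons, ih]

-- A's loop over the suffixes l.drop (L-m), …, l.drop (L-1) finds the longest border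
lemma pv_loopA_eq (l : List Char) (m : Nat) (hm : m ≤ l.length) :
    repeteLoopA ((List.range' (l.length - m) m).map (fun i => l.drop i)) l
      = (l.take (l.length - Nat.findGreatest (pvBorder l) m),
         l.drop (l.length - Nat.findGreatest (pvBorder l) m)) := by
  induction m with
  | zero => simp [repeteLoopA]
  | succ m ih =>
    have e : l.length - (m + 1) + 1 = l.length - m := by omega
    have hlen : (l.drop (l.length - (m + 1))).length = m + 1 := by
      simp
      omega
    rw [List.range'_succ, e, List.map_cons, repeteLoopA, hlen]
    rw [PySem.List.slice_to_natCast, Nat.findGreatest_succ]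
    by_cases hb : l.take (m + 1) = l.drop (l.length - (m + 1))
    · rw [if_pos hb, if_pos (show pvBorder l (m + 1) from hb)]
      rw [PySem.List.slice_to_neg_natCast l (m + 1) (by omega)]
    · rw [if_neg hb, if_neg (show ¬ pvBorder l (m + 1) from hb)]
      exact ih (by omega)

-- the longest border really is a border (or 0, where both sides are trivial)
lemma pv_border_drop_eq_take (l : List Char) (m : Nat) :
    l.drop (l.length - Nat.findGreatest (pvBorder l) m)
      = l.take (Nat.findGreatest (pvBorder l) m) := by
  rcases Nat.eq_zero_or_pos (Nat.findGreatest (pvBorder l) m) with h0 | hpos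
  · simp [h0]
  · obtain ⟨k, hk0, hkm, hk⟩ := Nat.findGreatest_pos.mp hpos
    exact (Nat.findGreatest_spec hkm hk).symm

lemma pv_pyRepeat_nonpos {α : Type} (xs : List α) (n : Int) (h : n ≤ 0) :
    PySem.List.pyRepeat xs n = [] := by
  simp [PySem.List.pyRepeat, Int.toNat_of_nonpos h]

lemma pv_pyRepeat_one {α : Type} (xs : List α) : PySem.List.pyRepeat xs 1 = xs := by
  simp [PySem.List.pyRepeat]

-- A's subStrings list is the list of proper suffixes
lemma pv_repeteSub_eq (l : List Char) :
    repeteSub l = (List.range' (l.length - (l.length - 1)) (l.length - 1)).map (fun i => l.drop i) := by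
  unfold repeteSub
  rw [pv_foldl_append_singleton, PySem.List.pyRange_one]
  rcases Nat.eq_zero_or_pos l.length with h0 | hpos
  · simp [h0]
  · have h1 : ((l.length : Int) - 1).toNat = l.length - 1 := by omega
    have h2 : l.length - (l.length - 1) = 1 := by omega
    rw [h1, h2, List.range'_eq_map_range]
    simp only [List.map_map, List.nil_append]
    apply List.map_congr_left
    intro k _
    have h3 : (1 : Int) + (k : Int) = ((1 + k : Nat) : Int) := by push_cast; ring
    simp only [Function.comp_apply, h3, PySem.List.slice_from_natCast]

-- ===== VERDICT (by name: the statement is the Claim_ definition above) =====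
theorem repete_spec : Claim_equal_repete := by
  intro palavra n _
  unfold Spec_repete repete repete_alt
  rw [pv_repeteSub_eq, pv_loopA_eq palavra.toList (palavra.toList.length - 1) (by omega)]
  by_cases hn : n ≤ 0
  · rw [if_pos hn]
    rw [pv_pyRepeat_nonpos _ _ hn, pv_pyRepeat_nonpos _ _ (by rw [if_neg (by omega : ¬ n > 0)])]
    rfl
  · rw [if_neg hn, if_pos (by omega : n > 0), pv_pyRepeat_one]
    simp only [pv_kmpFold_last, pvMB]
    rw [pv_border_drop_eq_take]
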